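-- pv_equiv track=rewrite | github.com/latteine1217/computational_physics | 1d_model.py | gray_next_flip_pos
-- ===== SOURCE A (Python) =====
-- def gray_next_flip_pos(t: int) -> int:
--     """
--     已在步 t 加入當前組態後，下一步 (t+1) 的 Gray code 與當前差一個 bit。
--     回傳要翻轉的 bit 位置 i（最右側 set bit 的索引）。
--     """
--     g  = t ^ (t >> 1)
--     g1 = (t + 1) ^ ((t + 1) >> 1)
--     diff = g ^ g1
--     # 找 diff 中最右側 1 的位置
--     pos = 0
--     while ((diff >> pos) & 1) == 0:
--         pos += 1
--     return pos
-- ===== SOURCE B (Python) =====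
-- def gray_next_flip_pos(t: int) -> int:
--     # Consecutive Gray codes g(t), g(t+1) differ exactly at the index of the
--     # lowest set bit of t+1, so skip the Gray-code construction and count the
--     # trailing zero bits of t+1 directly.
--     n = t + 1
--     pos = 0
--     while (n & 1) == 0:
--         n >>= 1
--         pos += 1
--     return pos
-- ===== Notes on version B (the rewrite author's own statement) =====
-- stated objective: simpler
-- what changed: B drops the Gray-code construction entirely: instead of computing g(t) XOR g(t+1) and scanning that value for its lowest set bit, it counts the trailing zero bits of t+1, which by the Gray-code identity is exactly the flipped position.
import Mathlib
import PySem

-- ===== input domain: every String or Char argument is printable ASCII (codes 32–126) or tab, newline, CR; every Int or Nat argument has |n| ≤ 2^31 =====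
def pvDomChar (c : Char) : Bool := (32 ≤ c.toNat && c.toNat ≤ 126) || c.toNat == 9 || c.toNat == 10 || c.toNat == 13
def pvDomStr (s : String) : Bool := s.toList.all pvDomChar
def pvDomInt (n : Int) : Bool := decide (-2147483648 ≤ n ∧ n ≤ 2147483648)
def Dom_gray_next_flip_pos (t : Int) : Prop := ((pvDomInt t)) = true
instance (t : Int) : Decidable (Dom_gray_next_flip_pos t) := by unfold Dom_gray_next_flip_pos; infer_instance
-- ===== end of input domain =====

-- B replaces A's Gray-code construction (g(t) XOR g(t+1), then a scan for its lowest set bit)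
-- by directly counting the trailing zero bits of t+1 — simpler, same return value on Pre_.


-- ===== PORT A =====
-- 'pos = 0; while ((diff >> pos) & 1) == 0: pos += 1; return pos'.
-- The inner 'if diff >>> pos = 0' is only a totality guard: Python loops forever
-- there (it happens only at t = -1, where diff = 0), outside Pre_.
def grayLoopA (diff : Int) (pos : Nat) : Int :=
  if PySem.Int.band (diff >>> pos) 1 = 0 then
    if diff >>> pos = 0 then (pos : Int) else grayLoopA diff (pos + 1)
  else (pos : Int)
termination_by (diff >>> pos).natAbs
decreasing_by
  rename_i h hz
  have h1 : PySem.Int.mod (diff >>> pos) 2 = 0 := by rw [← PySem.Int.band_one]; exact h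
  rw [PySem.Int.mod_eq_emod_of_pos (by norm_num)] at h1
  have e : diff >>> (pos + 1) = (diff >>> pos) / 2 := by
    rw [Int.shiftRight_add, Int.shiftRight_eq_div_pow]; norm_num
  rw [e]; omega

def gray_next_flip_pos (t : Int) : Int :=
  let g := PySem.Int.bxor t (t >>> (1:Nat))
  let g1 := PySem.Int.bxor (t + 1) ((t + 1) >>> (1:Nat))
  let diff := PySem.Int.bxor g g1
  grayLoopA diff 0

-- ===== PORT B =====
-- 'n = t + 1; pos = 0; while (n & 1) == 0: n >>= 1; pos += 1; return pos'.
-- 'if n = 0' is only a totality guard: Python loops forever there (t = -1), outside Pre_.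
def ctzLoopB (n : Int) (pos : Int) : Int :=
  if n = 0 then pos
  else if PySem.Int.band n 1 = 0 then ctzLoopB (n >>> (1:Nat)) (pos + 1)
  else pos
termination_by n.natAbs
decreasing_by
  rename_i hz h
  have h1 : PySem.Int.mod n 2 = 0 := by rw [← PySem.Int.band_one]; exact h
  rw [PySem.Int.mod_eq_emod_of_pos (by norm_num)] at h1
  have e : n >>> (1:Nat) = n / 2 := by rw [Int.shiftRight_eq_div_pow]; norm_num
  rw [e]; omega

def gray_next_flip_pos_alt (t : Int) : Int := ctzLoopB (t + 1) 0

-- ===== PRECONDITION & SPEC =====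
-- At t = -1 the Python A never returns (diff = 0, the while loop runs forever); Pre_ excludes exactly that input.
def Pre_gray_next_flip_pos (t : Int) : Prop := t ≠ -1
instance (t : Int) : Decidable (Pre_gray_next_flip_pos t) := by unfold Pre_gray_next_flip_pos; infer_instance
def pvWitness_gray_next_flip_pos : Int := 5

def Spec_gray_next_flip_pos (t : Int) (out : Int) : Prop := out = gray_next_flip_pos_alt t
instance (t : Int) (out : Int) : Decidable (Spec_gray_next_flip_pos t out) := by unfold Spec_gray_next_flip_pos; infer_instance

-- ===== CLAIM (what is proved, stated in full; the proofs are below) =====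
def Claim_equal_gray_next_flip_pos : Prop := ∀ (t : Int), Dom_gray_next_flip_pos t → Pre_gray_next_flip_pos t → Spec_gray_next_flip_pos t (gray_next_flip_pos t)

-- ===== LEMMAS AND PROOFS =====

-- bxor on the four sign patterns (PySem.Int.bxor is Python's ^ in two's complement).
lemma bxor_ofNat_ofNat (m n : Nat) :
    PySem.Int.bxor (Int.ofNat m) (Int.ofNat n) = Int.ofNat (m ^^^ n) := by
  simp [PySem.Int.bxor]

lemma bxor_ofNat_negSucc (m n : Nat) :
    PySem.Int.bxor (Int.ofNat m) (Int.negSucc n) = Int.negSucc (m ^^^ n) := by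
  simp only [PySem.Int.bxor, Int.negSucc_eq, Int.ofNat_eq_natCast]
  rw [if_pos (by positivity), if_neg (by omega)]
  have h1 : ((m:Int)).toNat = m := by omega
  have h2 : (-(-((n:Int)+1)) - 1).toNat = n := by omega
  rw [h1, h2]; ring

lemma bxor_negSucc_ofNat (m n : Nat) :
    PySem.Int.bxor (Int.negSucc m) (Int.ofNat n) = Int.negSucc (m ^^^ n) := by
  simp only [PySem.Int.bxor, Int.negSucc_eq, Int.ofNat_eq_natCast]
  rw [if_neg (by omega), if_pos (by positivity)]
  have h1 : (-(-((m:Int)+1)) - 1).toNat = m := by omega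
  have h2 : ((n:Int)).toNat = n := by omega
  rw [h1, h2]; ring

lemma bxor_negSucc_negSucc (m n : Nat) :
    PySem.Int.bxor (Int.negSucc m) (Int.negSucc n) = Int.ofNat (m ^^^ n) := by
  simp only [PySem.Int.bxor, Int.negSucc_eq, Int.ofNat_eq_natCast]
  rw [if_neg (by omega), if_neg (by omega)]
  have h1 : (-(-((m:Int)+1)) - 1).toNat = m := by omega
  have h2 : (-(-((n:Int)+1)) - 1).toNat = n := by omega
  rw [h1, h2]

-- halving shifts through bxor
lemma ofNat_shiftRight_one (m : Nat) : (Int.ofNat m) >>> (1:Nat) = Int.ofNat (m / 2) := by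
  rw [Int.shiftRight_eq_div_pow]
  simp only [Int.ofNat_eq_natCast]
  omega

lemma negSucc_shiftRight_one (m : Nat) : (Int.negSucc m) >>> (1:Nat) = Int.negSucc (m / 2) := by
  rw [Int.shiftRight_eq_div_pow, Int.negSucc_eq, Int.negSucc_eq]
  omega

lemma bxor_shiftRight_one (a b : Int) :
    (PySem.Int.bxor a b) >>> (1:Nat) = PySem.Int.bxor (a >>> (1:Nat)) (b >>> (1:Nat)) := by
  cases a with
  | ofNat m => cases b with
    | ofNat n =>
        rw [bxor_ofNat_ofNat, ofNat_shiftRight_one, ofNat_shiftRight_one, ofNat_shiftRight_one,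
          bxor_ofNat_ofNat, Nat.xor_div_two]
    | negSucc n =>
        rw [bxor_ofNat_negSucc, negSucc_shiftRight_one, ofNat_shiftRight_one, negSucc_shiftRight_one,
          bxor_ofNat_negSucc, Nat.xor_div_two]
  | negSucc m => cases b with
    | ofNat n =>
        rw [bxor_negSucc_ofNat, negSucc_shiftRight_one, negSucc_shiftRight_one, ofNat_shiftRight_one,
          bxor_negSucc_ofNat, Nat.xor_div_two]
    | negSucc n =>
        rw [bxor_negSucc_negSucc, ofNat_shiftRight_one, negSucc_shiftRight_one, negSucc_shiftRight_one,
          bxor_negSucc_negSucc, Nat.xor_div_two]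

-- parity of bxor: (a ^ b) % 2 = (a % 2 + b % 2) % 2  (emod)
lemma bxor_emod_two (a b : Int) : (PySem.Int.bxor a b) % 2 = (a % 2 + b % 2) % 2 := by
  cases a with
  | ofNat m => cases b with
    | ofNat n =>
        rw [bxor_ofNat_ofNat]
        have := @Nat.xor_mod_two_eq m n
        simp only [Int.ofNat_eq_natCast]
        omega
    | negSucc n =>
        rw [bxor_ofNat_negSucc]
        have := @Nat.xor_mod_two_eq m n
        rw [Int.negSucc_eq, Int.negSucc_eq]
        simp only [Int.ofNat_eq_natCast]
        omega
  | negSucc m => cases b with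
    | ofNat n =>
        rw [bxor_negSucc_ofNat]
        have := @Nat.xor_mod_two_eq m n
        rw [Int.negSucc_eq, Int.negSucc_eq]
        simp only [Int.ofNat_eq_natCast]
        omega
    | negSucc n =>
        rw [bxor_negSucc_negSucc]
        have := @Nat.xor_mod_two_eq m n
        rw [Int.negSucc_eq, Int.negSucc_eq]
        simp only [Int.ofNat_eq_natCast]
        omega

-- the value A scans: diff t = gray(t) XOR gray(t+1)
def diffA (t : Int) : Int :=
  PySem.Int.bxor (PySem.Int.bxor t (t >>> (1:Nat)))
    (PySem.Int.bxor (t + 1) ((t + 1) >>> (1:Nat)))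

lemma shiftRight_one_eq_ediv (x : Int) : x >>> (1:Nat) = x / 2 := by
  rw [Int.shiftRight_eq_div_pow]; norm_num

lemma band_one_emod (x : Int) : PySem.Int.band x 1 = x % 2 := by
  rw [PySem.Int.band_one, PySem.Int.mod_eq_emod_of_pos (by norm_num)]

-- diff is odd exactly when t is even
lemma diffA_emod_two (t : Int) : diffA t % 2 = if t % 2 = 0 then 1 else 0 := by
  unfold diffA
  rw [bxor_emod_two, bxor_emod_two, bxor_emod_two,
    shiftRight_one_eq_ediv, shiftRight_one_eq_ediv]
  split <;> omega

-- halving diff: for odd t, diff t >> 1 = diff (t >> 1)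
lemma diffA_shift (t : Int) (h : t % 2 = 1) :
    (diffA t) >>> (1:Nat) = diffA (t >>> (1:Nat)) := by
  unfold diffA
  rw [bxor_shiftRight_one, bxor_shiftRight_one, bxor_shiftRight_one]
  have e1 : (t + 1) >>> (1:Nat) = t >>> (1:Nat) + 1 := by
    rw [shiftRight_one_eq_ediv, shiftRight_one_eq_ediv]; omega
  rw [e1]

-- loop-shift lemmas
lemma grayLoopA_shift (d : Int) (pos : Nat) :
    grayLoopA d (pos + 1) = grayLoopA (d >>> (1:Nat)) pos + 1 := by
  have key : ∀ m : Nat, ∀ pos : Nat, (d >>> (pos + 1)).natAbs = m →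
      grayLoopA d (pos + 1) = grayLoopA (d >>> (1:Nat)) pos + 1 := by
    intro m
    induction m using Nat.strong_induction_on with
    | _ m ih =>
      intro pos hm
      have hsh : (d >>> (1:Nat)) >>> pos = d >>> (pos + 1) := by
        rw [← Int.shiftRight_add]; ring_nf
      conv_lhs => rw [grayLoopA]
      conv_rhs => rw [grayLoopA]
      rw [hsh]
      by_cases hb : PySem.Int.band (d >>> (pos + 1)) 1 = 0
      · simp only [hb, if_true]
        by_cases hz : d >>> (pos + 1) = 0
        · simp only [hz, if_true]; push_cast; ring
        · simp only [hz, if_false]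
          have hev : (d >>> (pos + 1)) % 2 = 0 := by rw [← band_one_emod]; exact hb
          have e2 : d >>> (pos + 1 + 1) = (d >>> (pos + 1)) / 2 := by
            rw [show pos + 1 + 1 = (pos + 1) + 1 from rfl, Int.shiftRight_add,
              shiftRight_one_eq_ediv]
          have hlt : (d >>> (pos + 1 + 1)).natAbs < m := by rw [e2]; omega
          exact ih _ hlt (pos + 1) rfl
      · simp only [hb, if_false]; push_cast; ring
  exact key _ pos rfl

lemma ctzLoopB_shift (n : Int) (pos : Int) :
    ctzLoopB n (pos + 1) = ctzLoopB n pos + 1 := by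
  have key : ∀ m : Nat, ∀ n : Int, ∀ pos : Int, n.natAbs = m →
      ctzLoopB n (pos + 1) = ctzLoopB n pos + 1 := by
    intro m
    induction m using Nat.strong_induction_on with
    | _ m ih =>
      intro n pos hm
      conv_lhs => rw [ctzLoopB]
      conv_rhs => rw [ctzLoopB]
      by_cases hz : n = 0
      · simp only [hz, if_true]
      · simp only [hz, if_false]
        by_cases hb : PySem.Int.band n 1 = 0
        · simp only [hb, if_true]
          have hev : n % 2 = 0 := by rw [← band_one_emod]; exact hb
          have hlt : (n >>> (1:Nat)).natAbs < m := by rw [shiftRight_one_eq_ediv]; omega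
          exact ih _ hlt _ (pos + 1) rfl
        · simp only [hb, if_false]
  exact key _ n pos rfl

-- main induction: for t ≠ -1, diff t ≠ 0 and the two loops agree
lemma main_loop (t : Int) (h : t ≠ -1) :
    diffA t ≠ 0 ∧ grayLoopA (diffA t) 0 = ctzLoopB (t + 1) 0 := by
  have key : ∀ m : Nat, ∀ t : Int, t ≠ -1 → (t + 1).natAbs = m →
      diffA t ≠ 0 ∧ grayLoopA (diffA t) 0 = ctzLoopB (t + 1) 0 := by
    intro m
    induction m using Nat.strong_induction_on with
    | _ m ih =>
      intro t ht hm
      have hpar := diffA_emod_two t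
      by_cases hev : t % 2 = 0
      · -- t even: diff odd, t+1 odd, both loops stop at 0
        rw [if_pos hev] at hpar
        constructor
        · intro h0; rw [h0] at hpar; norm_num at hpar
        · conv_lhs => rw [grayLoopA]
          conv_rhs => rw [ctzLoopB]
          have hb1 : ¬ PySem.Int.band ((diffA t) >>> (0:Nat)) 1 = 0 := by
            rw [Int.shiftRight_zero, band_one_emod, hpar]; norm_num
          have hb2 : ¬ PySem.Int.band (t + 1) 1 = 0 := by
            rw [band_one_emod]; omega
          have hz2 : ¬ (t + 1) = 0 := by omega
          simp only [hb1, if_false, hb2, hz2, Nat.cast_zero]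
      · -- t odd: recurse on t' = t >> 1
        have hodd : t % 2 = 1 := by omega
        rw [if_neg hev] at hpar
        set t' : Int := t >>> (1:Nat) with ht'
        have ht'e : t' = t / 2 := shiftRight_one_eq_ediv t
        have ht'ne : t' ≠ -1 := by rw [ht'e]; omega
        have hlt : (t' + 1).natAbs < m := by rw [ht'e]; omega
        obtain ⟨ihne, iheq⟩ := ih _ hlt t' ht'ne rfl
        have hshift := diffA_shift t hodd
        have hdne : diffA t ≠ 0 := by
          intro h0
          rw [h0, show ((0:Int) >>> (1:Nat)) = 0 from rfl] at hshift
          exact ihne hshift.symm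
        refine ⟨hdne, ?_⟩
        -- A side: one even step
        have hAstep : grayLoopA (diffA t) 0 = grayLoopA (diffA t') 0 + 1 := by
          conv_lhs => rw [grayLoopA]
          have hb : PySem.Int.band ((diffA t) >>> (0:Nat)) 1 = 0 := by
            rw [Int.shiftRight_zero, band_one_emod, hpar]
          have hz : ¬ (diffA t) >>> (0:Nat) = 0 := by rw [Int.shiftRight_zero]; exact hdne
          simp only [hb, if_true, hz, if_false]
          rw [grayLoopA_shift, hshift]
        -- B side: one even step
        have hBstep : ctzLoopB (t + 1) 0 = ctzLoopB (t' + 1) 0 + 1 := by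
          conv_lhs => rw [ctzLoopB]
          have hz : ¬ (t + 1) = 0 := by omega
          have hb : PySem.Int.band (t + 1) 1 = 0 := by rw [band_one_emod]; omega
          simp only [hz, if_false, hb, if_true]
          have e : (t + 1) >>> (1:Nat) = t' + 1 := by
            rw [shiftRight_one_eq_ediv, ht'e]; omega
          rw [e, ctzLoopB_shift]
        rw [hAstep, hBstep, iheq]
  exact key _ t h rfl

-- ===== VERDICT (by name: the statement is the Claim_ definition above) =====
theorem gray_next_flip_pos_spec : Claim_equal_gray_next_flip_pos := by
  intro t _ hpre
  show gray_next_flip_pos t = gray_next_flip_pos_alt t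
  change grayLoopA (diffA t) 0 = ctzLoopB (t + 1) 0
  exact (main_loop t hpre).2
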